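-- pv_equiv track=rewrite | github.com/AdityaVKarve/02249-Group25 | scripts/utility_functions.py | is_mst
-- ===== SOURCE A (Python) =====
-- class UnionFind:
--     def __init__(self, n):
--         self.parent = list(range(n))
--         self.rank = [0] * n
--
--     def find(self, u):
--         if self.parent[u] != u:
--             self.parent[u] = self.find(self.parent[u])
--         return self.parent[u]
--
--     def union(self, u, v):
--         root_u = self.find(u)
--         root_v = self.find(v)
--         if root_u != root_v:
--             if self.rank[root_u] > self.rank[root_v]:
--                 self.parent[root_v] = root_u
--             elif self.rank[root_u] < self.rank[root_v]:
--                 self.parent[root_u] = root_v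
--             else:
--                 self.parent[root_v] = root_u
--                 self.rank[root_u] += 1
--
-- def is_mst(vertex_count, graph, candidate_edges):
--     # Convert the adjacency list to an edge list
--     all_edges = []
--     for u in graph:
--         for v, weight in graph[u].items():
--             if u < v:  # Avoid duplicating edges
--                 all_edges.append((u, v, weight))
--
--     # Step 1: Check if candidate_edges has exactly |V| - 1 edges
--     if len(candidate_edges) != vertex_count - 1:
--         return False
--
--     # Step 2: Check if candidate_edges forms a connected acyclic graph
--     uf = UnionFind(vertex_count)
--     for u, v, weight in candidate_edges:
--         if uf.find(u) == uf.find(v):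
--             return False  # Cycle detected
--         uf.union(u, v)
--
--     # Step 3: Calculate the weight of candidate_edges and compare it to MST of all_edges
--     candidate_weight = sum(weight for _, _, weight in candidate_edges)
--
--     # Calculate MST weight using Kruskal's algorithm on all_edges
--     sorted_edges = sorted(all_edges, key=lambda x: x[2])  # Sort edges by weight
--     uf = UnionFind(vertex_count)
--     mst_weight = 0
--     edges_in_mst = 0
--
--     for u, v, weight in sorted_edges:
--         if uf.find(u) != uf.find(v):
--             uf.union(u, v)
--             mst_weight += weight
--             edges_in_mst += 1
--             if edges_in_mst == vertex_count - 1: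
--                 break
--
--     return candidate_weight == mst_weight
-- ===== SOURCE B (Python) =====
-- def is_mst(vertex_count, graph, candidate_edges):
--     # Quick size check: a spanning tree has exactly |V| - 1 edges.
--     if len(candidate_edges) != vertex_count - 1:
--         return False
--
--     # Acyclicity check with a flat component-label array (no union-find).
--     comp = list(range(vertex_count))
--     for u, v, _ in candidate_edges:
--         cu, cv = comp[u], comp[v]
--         if cu == cv:
--             return False
--         comp = [cu if c == cv else c for c in comp]
--
--     # Reference MST weight: greedy scan over the weight-sorted edge list,
--     # again tracking components by relabelling.
--     all_edges = [(u, v, w) for u, nbrs in graph.items()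
--                  for v, w in nbrs.items() if u < v]
--     comp = list(range(vertex_count))
--     mst_weight = 0
--     taken = 0
--     for u, v, w in sorted(all_edges, key=lambda e: e[2]):
--         cu, cv = comp[u], comp[v]
--         if cu != cv:
--             comp = [cu if c == cv else c for c in comp]
--             mst_weight += w
--             taken += 1
--             if taken == vertex_count - 1:
--                 break
--
--     return sum(w for _, _, w in candidate_edges) == mst_weight
-- ===== Notes on version B (the rewrite author's own statement) =====
-- stated objective: simpler
-- what changed: Replaces A's UnionFind class (recursive find with path compression plus union by rank, used twice) with a flat component-label array updated by wholesale relabelling on each merge: the cycle check becomes a direct label comparison and the Kruskal reference scan keeps no parent/rank state, and B tests the edge count before doing any other work.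
-- outside the precondition, e.g. on is_mst(2, {-2: {1: 3}}, [(0, 1, 3)]): A returns True, B returns True
import Mathlib
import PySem

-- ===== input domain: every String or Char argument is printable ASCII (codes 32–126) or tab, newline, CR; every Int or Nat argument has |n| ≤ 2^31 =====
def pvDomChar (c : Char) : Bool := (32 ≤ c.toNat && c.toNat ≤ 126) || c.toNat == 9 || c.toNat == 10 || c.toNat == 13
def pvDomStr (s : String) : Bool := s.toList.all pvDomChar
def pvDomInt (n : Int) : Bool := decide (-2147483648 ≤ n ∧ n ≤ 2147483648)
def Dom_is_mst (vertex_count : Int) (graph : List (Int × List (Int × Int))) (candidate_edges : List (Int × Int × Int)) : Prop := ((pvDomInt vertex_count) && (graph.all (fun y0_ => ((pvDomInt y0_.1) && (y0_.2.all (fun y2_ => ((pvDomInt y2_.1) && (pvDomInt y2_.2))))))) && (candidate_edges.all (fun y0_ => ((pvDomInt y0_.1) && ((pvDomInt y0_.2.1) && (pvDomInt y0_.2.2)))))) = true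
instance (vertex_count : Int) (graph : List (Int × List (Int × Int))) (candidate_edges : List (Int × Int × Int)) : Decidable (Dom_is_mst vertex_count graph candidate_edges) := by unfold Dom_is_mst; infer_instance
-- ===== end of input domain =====

-- B replaces A's recursive rank/path-compression union–find by a flat component-label
-- array updated by relabelling; equal return value on Pre_ (neither function mutates its
-- arguments).

-- ===== PORT A =====
-- total forms of Python's list indexing / assignment; exact for 0 ≤ i < len(xs),
-- the only case reached under Pre_is_mst
def aGet (xs : List Int) (i : Int) : Int := PySem.List.pyGetD xs i 0
def aSet (xs : List Int) (i v : Int) : List Int := PySem.List.pySetD xs i v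

-- UnionFind.find with path compression; fuel bounds the recursion depth
-- (callers pass length+1, sufficient under Pre_is_mst — proved via the rank invariant)
def ufFind : Nat → List Int → Int → List Int × Int
  | 0, parent, u => (parent, u)
  | fuel + 1, parent, u =>
    if aGet parent u ≠ u then
      let res := ufFind fuel parent (aGet parent u)
      let parent2 := aSet res.1 u res.2
      (parent2, aGet parent2 u)
    else
      (parent, aGet parent u)

-- UnionFind.union (union by rank)
def ufUnion (parent rank : List Int) (u v : Int) : List Int × List Int :=
  let f1 := ufFind (parent.length + 1) parent u
  let f2 := ufFind (f1.1.length + 1) f1.1 v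
  if f1.2 ≠ f2.2 then
    if aGet rank f1.2 > aGet rank f2.2 then (aSet f2.1 f2.2 f1.2, rank)
    else if aGet rank f1.2 < aGet rank f2.2 then (aSet f2.1 f1.2 f2.2, rank)
    else (aSet f2.1 f2.2 f1.2, aSet rank f1.2 (aGet rank f1.2 + 1))
  else (f2.1, rank)

-- Step 2 loop: cycle check over candidate_edges (none = "return False")
def aCheckEdges : List (Int × Int × Int) → List Int → List Int → Option (List Int × List Int)
  | [], parent, rank => some (parent, rank)
  | (u, v, _) :: rest, parent, rank =>
    let f1 := ufFind (parent.length + 1) parent u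
    let f2 := ufFind (f1.1.length + 1) f1.1 v
    if f1.2 = f2.2 then none
    else
      let pr := ufUnion f2.1 rank u v
      aCheckEdges rest pr.1 pr.2

-- Kruskal loop over the sorted edges, with the early break
def aKruskal : List (Int × Int × Int) → List Int → List Int → Int → Int → Int → Int
  | [], _, _, w, _, _ => w
  | (u, v, wt) :: rest, parent, rank, w, cnt, target =>
    let f1 := ufFind (parent.length + 1) parent u
    let f2 := ufFind (f1.1.length + 1) f1.1 v
    if f1.2 ≠ f2.2 then
      let pr := ufUnion f2.1 rank u v
      if cnt + 1 = target then w + wt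
      else aKruskal rest pr.1 pr.2 (w + wt) (cnt + 1) target
    else aKruskal rest f2.1 rank w cnt target

def is_mst (vertex_count : Int) (graph : List (Int × List (Int × Int))) (candidate_edges : List (Int × Int × Int)) : Bool :=
  let g := PySem.Dict.ofList graph
  let all_edges := g.items.foldl (fun acc un =>
      (PySem.Dict.ofList un.2).items.foldl (fun acc vw =>
        if un.1 < vw.1 then acc ++ [(un.1, vw.1, vw.2)] else acc) acc) []
  if PySem.List.len candidate_edges ≠ vertex_count - 1 then false
  else
    match aCheckEdges candidate_edges (PySem.List.pyRange 0 vertex_count 1)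
        (PySem.List.pyRepeat [(0 : Int)] vertex_count) with
    | none => false
    | some _ =>
      let candidate_weight := (candidate_edges.map (fun e => e.2.2)).sum
      let sorted_edges := PySem.List.sorted all_edges (fun e => e.2.2) false
      let mst_weight := aKruskal sorted_edges (PySem.List.pyRange 0 vertex_count 1)
        (PySem.List.pyRepeat [(0 : Int)] vertex_count) 0 0 (vertex_count - 1)
      decide (candidate_weight = mst_weight)

-- ===== PORT B =====
def bGet (xs : List Int) (i : Int) : Int := PySem.List.pyGetD xs i 0

-- merge the component labelled cv into the component labelled cu
def bJoin (comp : List Int) (cu cv : Int) : List Int :=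
  comp.map (fun c => if c = cv then cu else c)

-- cycle check by labels (none = "return False")
def bCheck : List (Int × Int × Int) → List Int → Option (List Int)
  | [], comp => some comp
  | (u, v, _) :: rest, comp =>
    let cu := bGet comp u
    let cv := bGet comp v
    if cu = cv then none else bCheck rest (bJoin comp cu cv)

-- greedy scan over the sorted edges, tracking components by relabelling
def bKruskal : List (Int × Int × Int) → List Int → Int → Int → Int → Int
  | [], _, w, _, _ => w
  | (u, v, wt) :: rest, comp, w, taken, target =>
    let cu := bGet comp u
    let cv := bGet comp v
    if cu ≠ cv then
      if taken + 1 = target then w + wt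
      else bKruskal rest (bJoin comp cu cv) (w + wt) (taken + 1) target
    else bKruskal rest comp w taken target

def is_mst_alt (vertex_count : Int) (graph : List (Int × List (Int × Int))) (candidate_edges : List (Int × Int × Int)) : Bool :=
  if PySem.List.len candidate_edges ≠ vertex_count - 1 then false
  else
    match bCheck candidate_edges (PySem.List.pyRange 0 vertex_count 1) with
    | none => false
    | some _ =>
      let all_edges := (PySem.Dict.ofList graph).items.flatMap (fun un =>
        ((PySem.Dict.ofList un.2).items.filter (fun vw => un.1 < vw.1)).map
          (fun vw => (un.1, vw.1, vw.2)))
      let mst_weight := bKruskal (PySem.List.sorted all_edges (fun e => e.2.2) false)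
        (PySem.List.pyRange 0 vertex_count 1) 0 0 (vertex_count - 1)
      decide ((candidate_edges.map (fun e => e.2.2)).sum = mst_weight)

-- ===== PRECONDITION & SPEC =====
-- Pre_ restricts to the natural domain: whenever the edge-count guard passes, all edge
-- endpoints (candidate and graph) must lie in [0, vertex_count); outside it A either
-- raises IndexError or indexes its arrays through Python's negative-index wraparound.
def Pre_is_mst (vertex_count : Int) (graph : List (Int × List (Int × Int))) (candidate_edges : List (Int × Int × Int)) : Prop :=
  ((candidate_edges.length : Int) = vertex_count - 1) →
    ((∀ e ∈ candidate_edges, 0 ≤ e.1 ∧ e.1 < vertex_count ∧ 0 ≤ e.2.1 ∧ e.2.1 < vertex_count) ∧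
     (∀ un ∈ graph, ∀ vw ∈ un.2, un.1 < vw.1 → 0 ≤ un.1 ∧ vw.1 < vertex_count))

instance (vertex_count : Int) (graph : List (Int × List (Int × Int))) (candidate_edges : List (Int × Int × Int)) : Decidable (Pre_is_mst vertex_count graph candidate_edges) := by
  unfold Pre_is_mst; infer_instance

def pvWitness_is_mst : Int × (List (Int × List (Int × Int))) × (List (Int × Int × Int)) :=
  (3, [(0, [(1, 2), (2, 1)]), (1, [(2, 5)])], [(0, 1, 2), (0, 2, 1)])

def Spec_is_mst (vertex_count : Int) (graph : List (Int × List (Int × Int))) (candidate_edges : List (Int × Int × Int)) (out : Bool) : Prop :=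
  out = is_mst_alt vertex_count graph candidate_edges

instance (vertex_count : Int) (graph : List (Int × List (Int × Int))) (candidate_edges : List (Int × Int × Int)) (out : Bool) : Decidable (Spec_is_mst vertex_count graph candidate_edges out) := by
  unfold Spec_is_mst; infer_instance

-- ===== CLAIM =====
def Claim_equal_is_mst : Prop := ∀ (vertex_count : Int) (graph : List (Int × List (Int × Int))) (candidate_edges : List (Int × Int × Int)), Dom_is_mst vertex_count graph candidate_edges → Pre_is_mst vertex_count graph candidate_edges → Spec_is_mst vertex_count graph candidate_edges (is_mst vertex_count graph candidate_edges)

-- ===== LEMMAS AND PROOFS =====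

-- Nat-indexed total access, the proof-side view of aGet/bGet
def lg (xs : List Int) (i : Nat) : Int := xs.getD i 0

lemma aGet_eq (xs : List Int) (u : Int) (h0 : 0 ≤ u) (h1 : u.toNat < xs.length) :
    aGet xs u = lg xs u.toNat := by
  rw [aGet, PySem.List.pyGetD_eq_getElem xs 0 h0 (by omega), lg, List.getD_eq_getElem xs 0 h1]

lemma bGet_eq (xs : List Int) (u : Int) (h0 : 0 ≤ u) (h1 : u.toNat < xs.length) :
    bGet xs u = lg xs u.toNat := aGet_eq xs u h0 h1

lemma aSet_eq (xs : List Int) (u v : Int) (h0 : 0 ≤ u) : aSet xs u v = xs.set u.toNat v :=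
  PySem.List.pySetD_of_nonneg xs v h0

lemma lg_set_self (xs : List Int) (i : Nat) (v : Int) (h : i < xs.length) :
    lg (xs.set i v) i = v := by
  rw [lg, List.getD_eq_getElem _ 0 (by simpa using h), List.getElem_set_self]

lemma lg_set_ne (xs : List Int) (i j : Nat) (v : Int) (h : i ≠ j) :
    lg (xs.set i v) j = lg xs j := by
  by_cases hj : j < xs.length
  · rw [lg, List.getD_eq_getElem _ 0 (by simpa using hj), List.getElem_set_ne h, lg,
      List.getD_eq_getElem _ 0 hj]
  · rw [lg, lg, List.getD_eq_default _ 0 (by simpa using hj), List.getD_eq_default _ 0 (by omega)]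

lemma lg_map (f : Int → Int) (xs : List Int) (i : Nat) (h : i < xs.length) :
    lg (xs.map f) i = f (lg xs i) := by
  rw [lg, List.getD_eq_getElem _ 0 (by simpa using h), List.getElem_map, lg,
    List.getD_eq_getElem _ 0 h]

lemma lg_mem (xs : List Int) (i : Nat) (h : i < xs.length) : lg xs i ∈ xs := by
  rw [lg, List.getD_eq_getElem _ 0 h]; exact List.getElem_mem h

-- "the parent chain from i reaches a root within k steps"
def ReachR (p : List Int) : Nat → Nat → Prop
  | 0, i => lg p i = (i : Int)
  | k + 1, i => lg p i = (i : Int) ∨ ReachR p k (lg p i).toNat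

def rootCount (n : Nat) (p : List Int) : Nat :=
  (List.range n).countP (fun i => decide (lg p i = (i : Int)))

-- the coupling invariant between A's union-find state (p, rank) and B's label array comp
structure UFInv (n : Nat) (p rank comp : List Int) : Prop where
  lp : p.length = n
  lr : rank.length = n
  lc : comp.length = n
  bnd : ∀ i, i < n → 0 ≤ lg p i ∧ (lg p i).toNat < n
  cls : ∀ i, i < n → lg comp (lg p i).toNat = lg comp i
  uniq : ∀ i j, i < n → j < n → lg p i = (i : Int) → lg p j = (j : Int) →
    lg comp i = lg comp j → i = j
  rkinc : ∀ i, i < n → lg p i ≠ (i : Int) → lg rank i < lg rank (lg p i).toNat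
  rknn : ∀ x ∈ rank, 0 ≤ x
  pot : rank.sum + (rootCount n p : Int) ≤ (n : Int)

lemma root_exists {n : Nat} {p rank comp : List Int} (inv : UFInv n p rank comp) (hn : 0 < n) :
    ∃ r, r < n ∧ lg p r = (r : Int) := by
  cases hm : List.argmax (fun i => lg rank i) (List.range n) with
  | none =>
    rw [List.argmax_eq_none] at hm
    simp [List.range_eq_nil] at hm
    omega
  | some m =>
    have hmem : m ∈ List.range n := List.argmax_mem hm
    have hmn : m < n := List.mem_range.mp hmem
    refine ⟨m, hmn, ?_⟩
    by_contra hroot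
    have h1 := inv.rkinc m hmn hroot
    have h2 : (lg p m).toNat ∈ List.range n := List.mem_range.mpr (inv.bnd m hmn).2
    have h3 := List.le_of_mem_argmax h2 hm
    simp only at h3
    omega

lemma rootCount_pos {n : Nat} {p rank comp : List Int} (inv : UFInv n p rank comp) (hn : 0 < n) :
    0 < rootCount n p := by
  obtain ⟨r, hr, hroot⟩ := root_exists inv hn
  exact List.countP_pos_iff.mpr ⟨r, List.mem_range.mpr hr, by simpa using hroot⟩

lemma rankBound {n : Nat} {p rank comp : List Int} (inv : UFInv n p rank comp) (hn : 0 < n) :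
    ∀ i, i < n → lg rank i ≤ (n : Int) - 1 := by
  intro i hi
  have hmem : lg rank i ∈ rank := lg_mem rank i (by rw [inv.lr]; exact hi)
  have hsum : lg rank i ≤ rank.sum := List.single_le_sum inv.rknn _ hmem
  have hrc : 0 < rootCount n p := rootCount_pos inv hn
  have := inv.pot
  omega

lemma reach_of_rank {n : Nat} {p rank comp : List Int} (inv : UFInv n p rank comp) :
    ∀ (k : Nat) (i : Nat), i < n → (n : Int) ≤ lg rank i + k → ReachR p k i := by
  intro k
  induction k with
  | zero =>
    intro i hi hk
    have := rankBound inv (by omega) i hi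
    simp at hk
    omega
  | succ m ih =>
    intro i hi hk
    by_cases hroot : lg p i = (i : Int)
    · exact Or.inl hroot
    · refine Or.inr (ih _ (inv.bnd i hi).2 ?_)
      have := inv.rkinc i hi hroot
      push_cast at hk ⊢
      omega

lemma reach_all {n : Nat} {p rank comp : List Int} (inv : UFInv n p rank comp) :
    ∀ i, i < n → ReachR p n i := by
  intro i hi
  refine reach_of_rank inv n i hi ?_
  have hmem : lg rank i ∈ rank := lg_mem rank i (by rw [inv.lr]; exact hi)
  have := inv.rknn _ hmem
  omega

lemma rootCount_congr {n : Nat} {p q : List Int}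
    (h : ∀ i, i < n → (lg p i = (i : Int) ↔ lg q i = (i : Int))) :
    rootCount n p = rootCount n q := by
  unfold rootCount
  exact List.countP_congr (fun i hi => by
    have := h i (List.mem_range.mp hi); simpa using this)

lemma ufFind_root {n : Nat} {rank comp : List Int} (fuel : Nat) (p : List Int) (u : Int)
    (inv : UFInv n p rank comp) (h0 : 0 ≤ u) (hu : u.toNat < n)
    (hroot : lg p u.toNat = u) (hf : 0 < fuel) : ufFind fuel p u = (p, u) := by
  cases fuel with
  | zero => omega
  | succ f =>
    have hget : aGet p u = u := by
      rw [aGet_eq p u h0 (by rw [inv.lp]; exact hu)]; exact hroot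
    simp only [ufFind, hget]
    simp

lemma ufFind_spec {n : Nat} {rank comp : List Int} :
    ∀ (k fuel : Nat) (p : List Int) (u : Int),
      UFInv n p rank comp → 0 ≤ u → u.toNat < n → ReachR p k u.toNat → k < fuel →
      UFInv n (ufFind fuel p u).1 rank comp ∧
      0 ≤ (ufFind fuel p u).2 ∧ (ufFind fuel p u).2.toNat < n ∧
      lg (ufFind fuel p u).1 (ufFind fuel p u).2.toNat = (ufFind fuel p u).2 ∧
      lg comp (ufFind fuel p u).2.toNat = lg comp u.toNat ∧
      (∀ j, j < n → (lg (ufFind fuel p u).1 j = (j : Int) ↔ lg p j = (j : Int))) ∧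
      (lg p u.toNat = u → (ufFind fuel p u) = (p, u)) ∧
      (lg p u.toNat ≠ u → lg rank u.toNat < lg rank (ufFind fuel p u).2.toNat) := by
  intro k
  induction k with
  | zero =>
    intro fuel p u inv h0 hu hr hf
    have hU : ((u.toNat : Nat) : Int) = u := Int.toNat_of_nonneg h0
    have hroot : lg p u.toNat = u := by rw [← hU] at hr ⊢; exact hr
    rw [ufFind_root fuel p u inv h0 hu hroot (by omega)]
    refine ⟨inv, h0, hu, hroot, rfl, fun j _ => Iff.rfl, fun _ => rfl, fun hc => absurd hroot hc⟩
  | succ k ih =>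
    intro fuel p u inv h0 hu hr hf
    have hU : ((u.toNat : Nat) : Int) = u := Int.toNat_of_nonneg h0
    by_cases hroot : lg p u.toNat = u
    · rw [ufFind_root fuel p u inv h0 hu hroot (by omega)]
      refine ⟨inv, h0, hu, hroot, rfl, fun j _ => Iff.rfl, fun _ => rfl, fun hc => absurd hroot hc⟩
    · -- non-root step
      cases fuel with
      | zero => omega
      | succ f =>
      have hpu0 : 0 ≤ lg p u.toNat := (inv.bnd u.toNat hu).1
      have hpun : (lg p u.toNat).toNat < n := (inv.bnd u.toNat hu).2
      have hget : aGet p u = lg p u.toNat := aGet_eq p u h0 (by rw [inv.lp]; exact hu)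
      have hr' : ReachR p k (lg p u.toNat).toNat := by
        cases hr with
        | inl h => rw [hU] at h; exact absurd h hroot
        | inr h => exact h
      have IH := ih f p (lg p u.toNat) inv hpu0 hpun hr' (by omega)
      obtain ⟨inv1, hr0, hrn, hrroot, hrcomp, hriff, hshort, hrrank⟩ := IH
      set res := ufFind f p (lg p u.toNat) with hres
      set p1 := res.1
      set r := res.2
      have hlp1 : p1.length = n := inv1.lp
      -- u is not a root of p1
      have hunr1 : lg p1 u.toNat ≠ (u.toNat : Int) := by
        intro h
        rw [hriff u.toNat hu, hU] at h
        exact hroot h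
      -- r ≠ u
      have hru : r ≠ u := by
        intro h
        have hx := hrroot
        rw [h] at hx
        exact hunr1 (by rw [hU]; exact hx)
      have hrtu : r.toNat ≠ u.toNat := by omega
      -- the compressed state
      have hp2eq : aSet p1 u r = p1.set u.toNat r := aSet_eq p1 u r h0
      set p2 := p1.set u.toNat r with hp2
      have hlp2 : p2.length = n := by rw [hp2, List.length_set]; exact hlp1
      have hutlt : u.toNat < p1.length := by rw [hlp1]; exact hu
      have hlg2u : lg p2 u.toNat = r := lg_set_self p1 u.toNat r hutlt
      have hlg2ne : ∀ j, j ≠ u.toNat → lg p2 j = lg p1 j := fun j hj =>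
        lg_set_ne p1 u.toNat j r (fun h => hj h.symm)
      -- evaluate the port
      have hstep : ufFind (f + 1) p u = (p2, r) := by
        have hcond : aGet p u ≠ u := by rw [hget]; exact hroot
        simp only [ufFind, ← hres, hget]
        rw [hp2eq]
        have : aGet (p1.set u.toNat r) u = r := by
          rw [aGet_eq _ u h0 (by rw [List.length_set]; exact hutlt)]
          exact hlg2u
        rw [this, if_pos hroot]
      rw [hstep]
      -- root sets of p2 and p1 agree (u is a root of neither)
      have hiff21 : ∀ j, j < n → (lg p2 j = (j : Int) ↔ lg p1 j = (j : Int)) := by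
        intro j hj
        by_cases hju : j = u.toNat
        · subst hju
          constructor
          · intro h
            rw [hlg2u] at h
            exact absurd (h.trans hU) hru
          · intro h; exact absurd h hunr1
        · rw [hlg2ne j hju]
      have hiff20 : ∀ j, j < n → (lg p2 j = (j : Int) ↔ lg p j = (j : Int)) := by
        intro j hj; rw [hiff21 j hj, hriff j hj]
      -- rank of u is below rank of r
      have hranklt : lg rank u.toNat < lg rank r.toNat := by
        by_cases hpu : lg p (lg p u.toNat).toNat = lg p u.toNat
        · have := hshort hpu
          have hrpu : r = lg p u.toNat := by show res.2 = _; rw [this]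
          rw [hrpu]
          exact inv.rkinc u.toNat hu (by rw [hU]; exact hroot)
        · have h1 := inv.rkinc u.toNat hu (by rw [hU]; exact hroot)
          have h2 := hrrank hpu
          omega
      -- the invariant for p2
      have inv2 : UFInv n p2 rank comp := by
        refine ⟨hlp2, inv1.lr, inv1.lc, ?_, ?_, ?_, ?_, inv1.rknn, ?_⟩
        · intro i hi
          by_cases hiu : i = u.toNat
          · subst hiu; rw [hlg2u]; exact ⟨hr0, hrn⟩
          · rw [hlg2ne i hiu]; exact inv1.bnd i hi
        · intro i hi
          by_cases hiu : i = u.toNat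
          · subst hiu
            rw [hlg2u, hrcomp]
            exact inv.cls u.toNat hu
          · rw [hlg2ne i hiu]; exact inv1.cls i hi
        · intro i j hi hj hri hrj hc
          exact inv1.uniq i j hi hj ((hiff21 i hi).mp hri) ((hiff21 j hj).mp hrj) hc
        · intro i hi hnri
          by_cases hiu : i = u.toNat
          · subst hiu
            rw [hlg2u]
            exact hranklt
          · rw [hlg2ne i hiu] at hnri ⊢
            exact inv1.rkinc i hi hnri
        · have : rootCount n p2 = rootCount n p1 := rootCount_congr hiff21
          rw [this]
          exact inv1.pot
      refine ⟨inv2, hr0, hrn, ?_, ?_, hiff20, fun hc => absurd hc hroot, fun _ => hranklt⟩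
      · rw [hlg2ne r.toNat hrtu]; exact hrroot
      · rw [hrcomp]; exact inv.cls u.toNat hu

lemma rootCount_set (p : List Int) (ra : Int) :
    ∀ (n : Nat) (rb : Nat), rb < n → rb < p.length → lg p rb = (rb : Int) → ra ≠ (rb : Int) →
      rootCount n (p.set rb ra) + 1 = rootCount n p := by
  intro n
  induction n with
  | zero => intro rb h; omega
  | succ m ih =>
    intro rb hrb hrbp hroot hne
    unfold rootCount
    rw [List.range_succ, List.countP_append, List.countP_append]
    by_cases hcase : rb = m
    · subst hcase
      have h1 : (List.range rb).countP (fun i => decide (lg (p.set rb ra) i = (i : Int))) =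
          (List.range rb).countP (fun i => decide (lg p i = (i : Int))) := by
        refine List.countP_congr (fun i hi => ?_)
        have : i ≠ rb := by have := List.mem_range.mp hi; omega
        simp [lg_set_ne p rb i ra (fun h => this h.symm)]
      have h2 : lg (p.set rb ra) rb = ra := lg_set_self p rb ra hrbp
      simp only [List.countP_cons, List.countP_nil, h1, h2]
      simp [hroot, hne]
    · have hrbm : rb < m := by omega
      have := ih rb hrbm hrbp hroot hne
      unfold rootCount at this
      have h2 : lg (p.set rb ra) m = lg p m := lg_set_ne p rb m ra hcase
      simp only [List.countP_cons, List.countP_nil, h2]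
      omega

lemma sum_set_incr (l : List Int) (i : Nat) (hi : i < l.length) :
    (l.set i (lg l i + 1)).sum = l.sum + 1 := by
  rw [List.sum_set]
  have hsplit : l.sum = (l.take i).sum + (l[i] + (l.drop (i + 1)).sum) := by
    conv_lhs => rw [← List.take_append_drop i l]
    rw [List.sum_append, ← List.getElem_cons_drop hi, List.sum_cons]
  have hlg : lg l i = l[i] := List.getD_eq_getElem l 0 hi
  rw [if_pos hi, hlg]
  omega

lemma bJoin_lg (comp : List Int) (cu cv : Int) (i : Nat) (h : i < comp.length) :
    lg (bJoin comp cu cv) i = if lg comp i = cv then cu else lg comp i :=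
  lg_map _ comp i h

lemma merge_inv {n : Nat} {p rank rank' comp : List Int} {ra rb : Int}
    (inv : UFInv n p rank comp)
    (hra0 : 0 ≤ ra) (hran : ra.toNat < n) (hrb0 : 0 ≤ rb) (hrbn : rb.toNat < n)
    (hroota : lg p ra.toNat = ra) (hrootb : lg p rb.toNat = rb)
    (hlen : rank'.length = n)
    (hother : ∀ j, j ≠ ra.toNat → lg rank' j = lg rank j)
    (hmono : lg rank ra.toNat ≤ lg rank' ra.toNat)
    (hgt : lg rank rb.toNat < lg rank' ra.toNat)
    (hnn : ∀ x ∈ rank', 0 ≤ x)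
    (hsum : rank'.sum ≤ rank.sum + 1)
    {cu cv : Int} (hcucv : cu ≠ cv)
    (hlab : (lg comp ra.toNat = cu ∧ lg comp rb.toNat = cv) ∨
            (lg comp ra.toNat = cv ∧ lg comp rb.toNat = cu)) :
    UFInv n (p.set rb.toNat ra) rank' (bJoin comp cu cv) := by
  have hUa : ((ra.toNat : Nat) : Int) = ra := Int.toNat_of_nonneg hra0
  have hUb : ((rb.toNat : Nat) : Int) = rb := Int.toNat_of_nonneg hrb0
  have hcne : lg comp ra.toNat ≠ lg comp rb.toNat := by
    rcases hlab with ⟨h1, h2⟩ | ⟨h1, h2⟩ <;> rw [h1, h2] <;>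
      first | exact hcucv | exact fun h => hcucv h.symm
  have hab : ra.toNat ≠ rb.toNat := by
    intro h; rw [h] at hcne; exact hcne rfl
  have hrbp : rb.toNat < p.length := by rw [inv.lp]; exact hrbn
  have hset_self : lg (p.set rb.toNat ra) rb.toNat = ra := lg_set_self p rb.toNat ra hrbp
  have hset_ne : ∀ j, j ≠ rb.toNat → lg (p.set rb.toNat ra) j = lg p j := fun j hj =>
    lg_set_ne p rb.toNat j ra (fun h => hj h.symm)
  have hc' : ∀ i, i < n → lg (bJoin comp cu cv) i = if lg comp i = cv then cu else lg comp i :=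
    fun i hi => bJoin_lg comp cu cv i (by rw [inv.lc]; exact hi)
  -- roots of the new parent array
  have hriff : ∀ j, j < n → (lg (p.set rb.toNat ra) j = (j : Int) ↔ (lg p j = (j : Int) ∧ j ≠ rb.toNat)) := by
    intro j hj
    by_cases hjb : j = rb.toNat
    · subst hjb
      rw [hset_self, hUb]
      constructor
      · intro h
        exact absurd (by rw [h]) hab
      · intro h; exact absurd rfl h.2
    · rw [hset_ne j hjb]
      exact ⟨fun h => ⟨h, hjb⟩, fun h => h.1⟩
  refine ⟨by rw [List.length_set]; exact inv.lp, by rw [hlen], by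
      simp only [bJoin, List.length_map]; exact inv.lc, ?_, ?_, ?_, ?_, hnn, ?_⟩
  · intro i hi
    by_cases hib : i = rb.toNat
    · subst hib; rw [hset_self]; exact ⟨hra0, hran⟩
    · rw [hset_ne i hib]; exact inv.bnd i hi
  · intro i hi
    by_cases hib : i = rb.toNat
    · subst hib
      rw [hset_self, hc' ra.toNat hran, hc' rb.toNat hrbn]
      rcases hlab with ⟨h1, h2⟩ | ⟨h1, h2⟩ <;> rw [h1, h2] <;> simp [hcucv]
    · rw [hset_ne i hib, hc' i hi, hc' (lg p i).toNat (inv.bnd i hi).2, inv.cls i hi]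
  · intro i j hi hj hri hrj hc
    obtain ⟨hri, hib⟩ := (hriff i hi).mp hri
    obtain ⟨hrj, hjb⟩ := (hriff j hj).mp hrj
    rw [hc' i hi, hc' j hj] at hc
    by_cases hci : lg comp i = cv <;> by_cases hcj : lg comp j = cv
    · exact inv.uniq i j hi hj hri hrj (hci.trans hcj.symm)
    · -- comp i = cv, comp j = cu
      rw [if_pos hci, if_neg hcj] at hc
      exfalso
      rcases hlab with ⟨h1, h2⟩ | ⟨h1, h2⟩
      · -- rb has label cv: i = rb, contradiction
        exact hib (inv.uniq i rb.toNat hi hrbn hri (by rw [hUb]; exact hrootb) (hci.trans h2.symm))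
      · -- ra has label cv, rb has label cu: i = ra, j = rb
        exact hjb (inv.uniq j rb.toNat hj hrbn hrj (by rw [hUb]; exact hrootb) (hc.symm.trans h2.symm))
    · rw [if_neg hci, if_pos hcj] at hc
      exfalso
      rcases hlab with ⟨h1, h2⟩ | ⟨h1, h2⟩
      · exact hjb (inv.uniq j rb.toNat hj hrbn hrj (by rw [hUb]; exact hrootb) (hcj.trans h2.symm))
      · exact hib (inv.uniq i rb.toNat hi hrbn hri (by rw [hUb]; exact hrootb) (hc.trans h2.symm))
    · rw [if_neg hci, if_neg hcj] at hc
      exact inv.uniq i j hi hj hri hrj hc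
  · intro i hi hnri
    by_cases hib : i = rb.toNat
    · subst hib
      rw [hset_self]
      rw [hother rb.toNat (fun h => hab h.symm)]
      exact hgt
    · rw [hset_ne i hib] at hnri ⊢
      by_cases hia : i = ra.toNat
      · subst hia
        exact absurd (by rw [hroota, hUa]) hnri
      · rw [hother i hia]
        have hrk := inv.rkinc i hi hnri
        by_cases hpa : (lg p i).toNat = ra.toNat
        · rw [hpa] at hrk ⊢; omega
        · rw [hother _ hpa]; exact hrk
  · have hrc := rootCount_set p ra n rb.toNat hrbn hrbp (by rw [hUb]; exact hrootb)
      (by rw [hUb]; intro h; rw [h] at hcne; exact hcne rfl)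
    have := inv.pot
    omega

lemma twoFind_spec {n : Nat} {rank comp : List Int} (p : List Int) (u v : Int)
    (inv : UFInv n p rank comp)
    (hu0 : 0 ≤ u) (hun : u.toNat < n) (hv0 : 0 ≤ v) (hvn : v.toNat < n) :
    UFInv n (ufFind ((ufFind (p.length + 1) p u).1.length + 1) (ufFind (p.length + 1) p u).1 v).1 rank comp ∧
    ((ufFind (p.length + 1) p u).2 = (ufFind ((ufFind (p.length + 1) p u).1.length + 1) (ufFind (p.length + 1) p u).1 v).2
      ↔ lg comp u.toNat = lg comp v.toNat) := by
  obtain ⟨inv1, hr10, hr1n, hroot1, hcomp1, hiff1, -, -⟩ :=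
    ufFind_spec (n := n) n (p.length + 1) p u inv hu0 hun (reach_all inv u.toNat hun)
      (by rw [inv.lp]; omega)
  set f1 := ufFind (p.length + 1) p u with hf1
  obtain ⟨inv2, hr20, hr2n, hroot2, hcomp2, hiff2, -, -⟩ :=
    ufFind_spec (n := n) n (f1.1.length + 1) f1.1 v inv1 hv0 hvn (reach_all inv1 v.toNat hvn)
      (by rw [inv1.lp]; omega)
  set f2 := ufFind (f1.1.length + 1) f1.1 v with hf2
  refine ⟨inv2, ?_, ?_⟩
  · intro h
    rw [← hcomp1, ← hcomp2, ← h]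
  · intro h
    have hroot1' : lg f2.1 f1.2.toNat = f1.2 := by
      have := (hiff2 f1.2.toNat hr1n).mpr
        (by rw [Int.toNat_of_nonneg hr10]; exact hroot1)
      rw [Int.toNat_of_nonneg hr10] at this
      exact this
    have hroot2' : lg f2.1 f2.2.toNat = (f2.2.toNat : Int) := by
      rw [Int.toNat_of_nonneg hr20]; exact hroot2
    have hceq : lg comp f1.2.toNat = lg comp f2.2.toNat := by
      rw [hcomp1, hcomp2]; exact h
    have := inv2.uniq f1.2.toNat f2.2.toNat hr1n hr2n
      (by rw [Int.toNat_of_nonneg hr10]; exact hroot1') hroot2' hceq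
    omega

lemma ufUnion_spec {n : Nat} {rank comp : List Int} (p : List Int) (u v : Int)
    (inv : UFInv n p rank comp)
    (hu0 : 0 ≤ u) (hun : u.toNat < n) (hv0 : 0 ≤ v) (hvn : v.toNat < n)
    (hne : lg comp u.toNat ≠ lg comp v.toNat) :
    UFInv n (ufUnion p rank u v).1 (ufUnion p rank u v).2
      (bJoin comp (lg comp u.toNat) (lg comp v.toNat)) := by
  obtain ⟨inv1, hr10, hr1n, hroot1, hcomp1, hiff1, -, -⟩ :=
    ufFind_spec (n := n) n (p.length + 1) p u inv hu0 hun (reach_all inv u.toNat hun)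
      (by rw [inv.lp]; omega)
  set f1 := ufFind (p.length + 1) p u with hf1
  obtain ⟨inv2, hr20, hr2n, hroot2, hcomp2, hiff2, -, -⟩ :=
    ufFind_spec (n := n) n (f1.1.length + 1) f1.1 v inv1 hv0 hvn (reach_all inv1 v.toNat hvn)
      (by rw [inv1.lp]; omega)
  set f2 := ufFind (f1.1.length + 1) f1.1 v with hf2
  have hiffu := (twoFind_spec p u v inv hu0 hun hv0 hvn).2
  rw [← hf1, ← hf2] at hiffu
  have hrne : f1.2 ≠ f2.2 := fun h => hne (hiffu.mp h)
  -- the two roots are roots of the common state f2.1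
  have hroot1' : lg f2.1 f1.2.toNat = f1.2 := by
    have := (hiff2 f1.2.toNat hr1n).mpr (by rw [Int.toNat_of_nonneg hr10]; exact hroot1)
    rw [Int.toNat_of_nonneg hr10] at this
    exact this
  have hga : aGet rank f1.2 = lg rank f1.2.toNat := aGet_eq rank f1.2 hr10 (by rw [inv.lr]; exact hr1n)
  have hgb : aGet rank f2.2 = lg rank f2.2.toNat := aGet_eq rank f2.2 hr20 (by rw [inv.lr]; exact hr2n)
  have hsa : aSet f2.1 f2.2 f1.2 = f2.1.set f2.2.toNat f1.2 := aSet_eq _ _ _ hr20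
  have hsb : aSet f2.1 f1.2 f2.2 = f2.1.set f1.2.toNat f2.2 := aSet_eq _ _ _ hr10
  have hlab1 : lg comp f1.2.toNat = lg comp u.toNat ∧ lg comp f2.2.toNat = lg comp v.toNat :=
    ⟨hcomp1, hcomp2⟩
  have hpot := inv2.pot
  simp only [ufUnion, ← hf1, ← hf2, if_pos hrne, hga, hgb]
  by_cases hc1 : lg rank f2.2.toNat < lg rank f1.2.toNat
  · rw [if_pos hc1, hsa]
    exact merge_inv inv2 hr10 hr1n hr20 hr2n hroot1' hroot2 inv2.lr
      (fun _ _ => rfl) le_rfl hc1 inv2.rknn (by omega) hne (Or.inl hlab1)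
  · rw [if_neg hc1]
    by_cases hc2 : lg rank f1.2.toNat < lg rank f2.2.toNat
    · rw [if_pos hc2, hsb]
      exact merge_inv inv2 hr20 hr2n hr10 hr1n hroot2 hroot1' inv2.lr
        (fun _ _ => rfl) le_rfl hc2 inv2.rknn (by omega) hne
        (Or.inr ⟨hlab1.2, hlab1.1⟩)
    · rw [if_neg hc2, hsa]
      have hset := aSet_eq rank f1.2 (aGet rank f1.2 + 1) hr10
      rw [hga] at hset
      rw [hset]
      have hlenr : f1.2.toNat < rank.length := by rw [inv.lr]; exact hr1n
      refine merge_inv inv2 hr10 hr1n hr20 hr2n hroot1' hroot2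
        (by rw [List.length_set]; exact inv2.lr) ?_ ?_ ?_ ?_ ?_ hne (Or.inl hlab1)
      · intro j hj
        exact lg_set_ne rank f1.2.toNat j _ (fun h => hj h.symm)
      · rw [lg_set_self rank f1.2.toNat _ hlenr]; omega
      · rw [lg_set_self rank f1.2.toNat _ hlenr]; omega
      · intro x hx
        rcases List.mem_or_eq_of_mem_set hx with hx | hx
        · exact inv2.rknn x hx
        · have := inv2.rknn _ (lg_mem rank f1.2.toNat hlenr)
          omega
      · rw [sum_set_incr rank f1.2.toNat hlenr]

lemma check_eq {n : Nat} :
    ∀ (edges : List (Int × Int × Int)) (p rank comp : List Int),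
      UFInv n p rank comp →
      (∀ e ∈ edges, 0 ≤ e.1 ∧ e.1.toNat < n ∧ 0 ≤ e.2.1 ∧ e.2.1.toNat < n) →
      ((aCheckEdges edges p rank = none) ↔ (bCheck edges comp = none)) := by
  intro edges
  induction edges with
  | nil => intro p rank comp inv hb; simp [aCheckEdges, bCheck]
  | cons e rest ih =>
    obtain ⟨u, v, w⟩ := e
    intro p rank comp inv hb
    obtain ⟨hu0, hun, hv0, hvn⟩ := hb (u, v, w) (List.mem_cons_self)
    obtain ⟨inv2, hiffc⟩ := twoFind_spec p u v inv hu0 hun hv0 hvn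
    have hgu : bGet comp u = lg comp u.toNat := bGet_eq comp u hu0 (by rw [inv.lc]; exact hun)
    have hgv : bGet comp v = lg comp v.toNat := bGet_eq comp v hv0 (by rw [inv.lc]; exact hvn)
    simp only [aCheckEdges, bCheck, hgu, hgv]
    by_cases h : lg comp u.toNat = lg comp v.toNat
    · rw [if_pos (hiffc.mpr h), if_pos h]
      simp
    · rw [if_neg (fun hh => h (hiffc.mp hh)), if_neg h]
      exact ih _ _ _ (ufUnion_spec _ u v inv2 hu0 hun hv0 hvn h)
        (fun e he => hb e (List.mem_cons_of_mem _ he))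

lemma kruskal_eq {n : Nat} :
    ∀ (edges : List (Int × Int × Int)) (p rank comp : List Int) (w cnt target : Int),
      UFInv n p rank comp →
      (∀ e ∈ edges, 0 ≤ e.1 ∧ e.1.toNat < n ∧ 0 ≤ e.2.1 ∧ e.2.1.toNat < n) →
      aKruskal edges p rank w cnt target = bKruskal edges comp w cnt target := by
  intro edges
  induction edges with
  | nil => intro p rank comp w cnt target inv hb; simp [aKruskal, bKruskal]
  | cons e rest ih =>
    obtain ⟨u, v, wt⟩ := e
    intro p rank comp w cnt target inv hb
    obtain ⟨hu0, hun, hv0, hvn⟩ := hb (u, v, wt) (List.mem_cons_self)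
    obtain ⟨inv2, hiffc⟩ := twoFind_spec p u v inv hu0 hun hv0 hvn
    have hgu : bGet comp u = lg comp u.toNat := bGet_eq comp u hu0 (by rw [inv.lc]; exact hun)
    have hgv : bGet comp v = lg comp v.toNat := bGet_eq comp v hv0 (by rw [inv.lc]; exact hvn)
    simp only [aKruskal, bKruskal, hgu, hgv]
    by_cases h : lg comp u.toNat = lg comp v.toNat
    · rw [if_neg (fun hh => hh (hiffc.mpr h)), if_neg (fun hh => hh h)]
      exact ih _ _ _ w cnt target inv2 (fun e he => hb e (List.mem_cons_of_mem _ he))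
    · rw [if_pos (fun hh => h (hiffc.mp hh)), if_pos h]
      by_cases htar : cnt + 1 = target
      · rw [if_pos htar, if_pos htar]
      · rw [if_neg htar, if_neg htar]
        exact ih _ _ _ (w + wt) (cnt + 1) target
          (ufUnion_spec _ u v inv2 hu0 hun hv0 hvn h)
          (fun e he => hb e (List.mem_cons_of_mem _ he))

lemma mem_foldl_insert_items {κ ν : Type} [BEq κ] [LawfulBEq κ] :
    ∀ (l : List (κ × ν)) (d : PySem.Dict κ ν) (q : κ × ν),
      q ∈ (l.foldl (fun acc p => acc.insert p.1 p.2) d).items → q ∈ d.items ∨ q ∈ l := by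
  intro l
  induction l with
  | nil => intro d q h; exact Or.inl h
  | cons x rest ih =>
    intro d q h
    rcases ih (d.insert x.1 x.2) q h with h | h
    · rcases (PySem.Dict.mem_items_insert d x.1 x.2 q).mp h with h | h
      · exact Or.inr (by rw [h]; exact List.mem_cons_self)
      · exact Or.inl h.1
    · exact Or.inr (List.mem_cons_of_mem _ h)

lemma mem_ofList_items {κ ν : Type} [BEq κ] [LawfulBEq κ] (l : List (κ × ν)) (q : κ × ν)
    (h : q ∈ (PySem.Dict.ofList l).items) : q ∈ l := by
  rcases mem_foldl_insert_items l PySem.Dict.empty q h with h | h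
  · simp [PySem.Dict.empty] at h
  · exact h

-- A's nested append loop builds exactly B's comprehension
lemma edges_eq (graph : List (Int × List (Int × Int))) :
    ((PySem.Dict.ofList graph).items.foldl (fun acc un =>
        (PySem.Dict.ofList un.2).items.foldl (fun acc vw =>
          if un.1 < vw.1 then acc ++ [(un.1, vw.1, vw.2)] else acc) acc) ([] : List (Int × Int × Int)))
    = (PySem.Dict.ofList graph).items.flatMap (fun un =>
        ((PySem.Dict.ofList un.2).items.filter (fun vw => un.1 < vw.1)).map
          (fun vw => (un.1, vw.1, vw.2))) := by
  rw [PySem.List.foldl_congr_mem _ _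
      (fun acc un => acc ++ ((PySem.Dict.ofList un.2).items.filter
        (fun vw => decide (un.1 < vw.1))).map (fun vw => (un.1, vw.1, vw.2))) _
      (fun acc un _ => PySem.List.foldl_append_ite _ _ _ _),
    PySem.List.foldl_append_eq_flatMap]
  simp

lemma allEdges_bounds (vc : Int) (graph : List (Int × List (Int × Int)))
    (hg : ∀ un ∈ graph, ∀ vw ∈ un.2, un.1 < vw.1 → 0 ≤ un.1 ∧ vw.1 < vc) :
    ∀ e ∈ (PySem.Dict.ofList graph).items.flatMap (fun un =>
        ((PySem.Dict.ofList un.2).items.filter (fun vw => un.1 < vw.1)).map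
          (fun vw => (un.1, vw.1, vw.2))),
      0 ≤ e.1 ∧ e.1.toNat < vc.toNat ∧ 0 ≤ e.2.1 ∧ e.2.1.toNat < vc.toNat := by
  intro e he
  simp only [List.mem_flatMap, List.mem_map, List.mem_filter, decide_eq_true_eq] at he
  obtain ⟨un, hun, vw, ⟨hvw, hlt⟩, rfl⟩ := he
  obtain ⟨h1, h2⟩ := hg un (mem_ofList_items graph un hun) vw (mem_ofList_items un.2 vw hvw) hlt
  dsimp only
  refine ⟨h1, by omega, by omega, by omega⟩

lemma inv_init (vc : Int) (hvc : 0 < vc) :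
    UFInv vc.toNat (PySem.List.pyRange 0 vc 1) (PySem.List.pyRepeat [(0 : Int)] vc)
      (PySem.List.pyRange 0 vc 1) := by
  have hlen : (PySem.List.pyRange 0 vc 1).length = vc.toNat := by
    rw [PySem.List.length_pyRange_one]; omega
  have hlg : ∀ i, i < vc.toNat → lg (PySem.List.pyRange 0 vc 1) i = (i : Int) := by
    intro i hi
    rw [lg, List.getD_eq_getElem _ 0 (by rw [hlen]; exact hi),
      PySem.List.getElem_pyRange_one]
    omega
  have hrank : PySem.List.pyRepeat [(0 : Int)] vc = List.replicate vc.toNat 0 :=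
    PySem.List.pyRepeat_singleton 0 vc
  refine ⟨hlen, by rw [hrank, List.length_replicate], hlen, ?_, ?_, ?_, ?_, ?_, ?_⟩
  · intro i hi; rw [hlg i hi]; constructor <;> omega
  · intro i hi; simp [hlg i hi]
  · intro i j hi hj _ _ hc
    rw [hlg i hi, hlg j hj] at hc
    omega
  · intro i hi hne; exact absurd (hlg i hi) hne
  · intro x hx
    rw [hrank] at hx
    rw [List.eq_of_mem_replicate hx]
  · have hsum : (PySem.List.pyRepeat [(0 : Int)] vc).sum = 0 := by
      rw [hrank]; simp
    have hrc : rootCount vc.toNat (PySem.List.pyRange 0 vc 1) = vc.toNat := by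
      unfold rootCount
      have h := List.countP_eq_length
        (p := fun i => decide (lg (PySem.List.pyRange 0 vc 1) i = (i : Int)))
        (l := List.range vc.toNat)
      rw [h.mpr (fun a ha => by simp [hlg a (List.mem_range.mp ha)]), List.length_range]
    rw [hsum, hrc]
    omega

-- ===== VERDICT (by name: the statement is the Claim_ definition above) =====
theorem is_mst_spec : Claim_equal_is_mst := by
  intro vc graph cand _dom hpre
  unfold Spec_is_mst is_mst is_mst_alt
  simp only [PySem.List.len_eq]
  by_cases hlen : (cand.length : Int) = vc - 1
  · rw [if_neg (fun h => h hlen), if_neg (fun h => h hlen)]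
    obtain ⟨hcand, hgraph⟩ := hpre hlen
    have hvc : 0 < vc := by
      have : (0 : Int) ≤ (cand.length : Int) := Int.natCast_nonneg _
      omega
    have inv0 := inv_init vc hvc
    have hcb : ∀ e ∈ cand, 0 ≤ e.1 ∧ e.1.toNat < vc.toNat ∧ 0 ≤ e.2.1 ∧ e.2.1.toNat < vc.toNat := by
      intro e he
      obtain ⟨h1, h2, h3, h4⟩ := hcand e he
      exact ⟨h1, by omega, h3, by omega⟩
    have hcheck := check_eq cand _ _ _ inv0 hcb
    cases hA : aCheckEdges cand (PySem.List.pyRange 0 vc 1) (PySem.List.pyRepeat [(0 : Int)] vc) with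
    | none =>
      rw [hA] at hcheck
      rw [hcheck.mp rfl]
    | some st =>
      rw [hA] at hcheck
      cases hB : bCheck cand (PySem.List.pyRange 0 vc 1) with
      | none => rw [hB] at hcheck; exact absurd (hcheck.mpr rfl) (by simp)
      | some c =>
        simp only [edges_eq graph]
        have hbounds := allEdges_bounds vc graph hgraph
        have hsb : ∀ e ∈ PySem.List.sorted ((PySem.Dict.ofList graph).items.flatMap (fun un =>
            ((PySem.Dict.ofList un.2).items.filter (fun vw => un.1 < vw.1)).map
              (fun vw => (un.1, vw.1, vw.2)))) (fun e => e.2.2) false,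
            0 ≤ e.1 ∧ e.1.toNat < vc.toNat ∧ 0 ≤ e.2.1 ∧ e.2.1.toNat < vc.toNat := by
          intro e he
          exact hbounds e ((PySem.List.sorted_perm _ _ _).mem_iff.mp he)
        rw [kruskal_eq _ _ _ _ 0 0 (vc - 1) inv0 hsb]
  · rw [if_pos hlen, if_pos hlen]
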